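-- pv_equiv track=rewrite | github.com/Ishnika/Python-codes- | pattern/rev_right_triangle.py | generate_right_angled_triangle
-- ===== SOURCE A (Python) =====
-- def generate_right_angled_triangle(n):
--     lst1=[]
--     for i in range(1,n+1):
--         str1=""
--         for j in range(0,n):
--             if j>=n-i:
--                 str1+="*"
--             else:
--                 str1+=" "
--         lst1.append(str1)
--     return(lst1)
-- ===== SOURCE B (Python) =====
-- def generate_right_angled_triangle(n):
--     return [" " * (n - i) + "*" * i for i in range(1, n + 1)]
-- ===== Notes on version B (the rewrite author's own statement) =====
-- stated objective: simpler
-- what changed: Replaced the nested per-character column loop with a single comprehension that computes each row in closed form as ' '*(n-i) + '*'*i.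
import Mathlib
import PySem

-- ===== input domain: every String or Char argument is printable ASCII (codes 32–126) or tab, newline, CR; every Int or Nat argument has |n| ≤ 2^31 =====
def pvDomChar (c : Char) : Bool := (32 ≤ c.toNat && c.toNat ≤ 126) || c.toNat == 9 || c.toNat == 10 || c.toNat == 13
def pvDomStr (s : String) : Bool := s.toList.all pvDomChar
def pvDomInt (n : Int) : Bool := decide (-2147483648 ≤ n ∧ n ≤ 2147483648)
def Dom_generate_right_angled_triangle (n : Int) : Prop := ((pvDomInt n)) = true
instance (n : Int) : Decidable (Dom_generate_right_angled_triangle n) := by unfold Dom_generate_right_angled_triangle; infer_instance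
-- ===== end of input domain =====

-- B replaces A's nested per-character column loop by a per-row closed form (' '*(n-i) + '*'*i); objective: simpler.

-- ===== PORT A =====
-- inner loop: for j in range(0,n): str1 += "*" if j>=n-i else " "
def pvRowA (n i : Int) : String :=
  (PySem.List.pyRange 0 n 1).foldl
    (fun str1 j => if n - i ≤ j then str1 ++ "*" else str1 ++ " ") ""

def generate_right_angled_triangle (n : Int) : List String :=
  (PySem.List.pyRange 1 (n + 1) 1).foldl (fun lst1 i => lst1 ++ [pvRowA n i]) []

-- ===== PORT B =====
def generate_right_angled_triangle_alt (n : Int) : List String :=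
  (PySem.List.pyRange 1 (n + 1) 1).map
    (fun i => String.ofList (List.replicate (n - i).toNat ' ') ++ String.ofList (List.replicate i.toNat '*'))

-- ===== PRECONDITION & SPEC =====
def Spec_generate_right_angled_triangle (n : Int) (out : List String) : Prop := out = generate_right_angled_triangle_alt n
instance (n : Int) (out : List String) : Decidable (Spec_generate_right_angled_triangle n out) := by unfold Spec_generate_right_angled_triangle; infer_instance

-- ===== CLAIM (what is proved, stated in full; the proofs are below) =====
def Claim_equal_generate_right_angled_triangle : Prop := ∀ (n : Int), Dom_generate_right_angled_triangle n → Spec_generate_right_angled_triangle n (generate_right_angled_triangle n)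

-- ===== LEMMAS AND PROOFS =====

theorem pv_foldl_append_map (l : List Int) (f : Int → String) :
    ∀ acc : List String, l.foldl (fun a i => a ++ [f i]) acc = acc ++ l.map f := by
  induction l with
  | nil => simp
  | cons x xs ih => intro acc; simp [List.foldl, ih]

-- folding a constant one-char append over a list yields the replicate string
theorem pv_fold_const (c : Char) (g : Int → String) (l : List Int)
    (h : ∀ j ∈ l, g j = String.ofList [c]) :
    ∀ s : String, l.foldl (fun s j => s ++ g j) s = s ++ String.ofList (List.replicate l.length c) := by
  induction l with
  | nil => intro s; apply String.toList_inj.mp; simp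
  | cons x xs ih =>
    intro s
    simp only [List.foldl]
    rw [ih (fun j hj => h j (List.mem_cons_of_mem _ hj)), h x (List.mem_cons_self)]
    apply String.toList_inj.mp
    simp [List.replicate_succ]

theorem pv_row_eq (n i : Int) (h1 : 1 ≤ i) (h2 : i ≤ n) :
    pvRowA n i = String.ofList (List.replicate (n - i).toNat ' ') ++ String.ofList (List.replicate i.toNat '*') := by
  unfold pvRowA
  rw [PySem.List.pyRange_one_append 0 (n - i) n (by omega) (by omega)]
  rw [List.foldl_append]
  have hfirst :
      (PySem.List.pyRange 0 (n - i) 1).foldl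
        (fun str1 j => if n - i ≤ j then str1 ++ "*" else str1 ++ " ") "" =
      String.ofList (List.replicate (n - i).toNat ' ') := by
    have := pv_fold_const ' ' (fun j => " ") (PySem.List.pyRange 0 (n - i) 1) (by intro j hj; rfl) ""
    calc (PySem.List.pyRange 0 (n - i) 1).foldl
          (fun str1 j => if n - i ≤ j then str1 ++ "*" else str1 ++ " ") ""
        = (PySem.List.pyRange 0 (n - i) 1).foldl (fun s j => s ++ (fun _ : Int => " ") j) "" := by
          apply PySem.List.foldl_congr_mem
          intro s j hj
          rw [PySem.List.mem_pyRange_one] at hj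
          rw [if_neg (by omega : ¬ n - i ≤ j)]
      _ = "" ++ String.ofList (List.replicate (PySem.List.pyRange 0 (n - i) 1).length ' ') := this
      _ = String.ofList (List.replicate (n - i).toNat ' ') := by
          apply String.toList_inj.mp
          simp [PySem.List.length_pyRange_one]
  rw [hfirst]
  have := pv_fold_const '*' (fun j => "*") (PySem.List.pyRange (n - i) n 1) (by intro j hj; rfl)
      (String.ofList (List.replicate (n - i).toNat ' '))
  calc (PySem.List.pyRange (n - i) n 1).foldl
        (fun str1 j => if n - i ≤ j then str1 ++ "*" else str1 ++ " ")
        (String.ofList (List.replicate (n - i).toNat ' '))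
      = (PySem.List.pyRange (n - i) n 1).foldl (fun s j => s ++ (fun _ : Int => "*") j)
        (String.ofList (List.replicate (n - i).toNat ' ')) := by
        apply PySem.List.foldl_congr_mem
        intro s j hj
        rw [PySem.List.mem_pyRange_one] at hj
        rw [if_pos (by omega : n - i ≤ j)]
    _ = String.ofList (List.replicate (n - i).toNat ' ') ++
        String.ofList (List.replicate (PySem.List.pyRange (n - i) n 1).length '*') := this
    _ = String.ofList (List.replicate (n - i).toNat ' ') ++ String.ofList (List.replicate i.toNat '*') := by
        apply String.toList_inj.mp
        simp [PySem.List.length_pyRange_one]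

-- ===== VERDICT (by name: the statement is the Claim_ definition above) =====
theorem generate_right_angled_triangle_spec : Claim_equal_generate_right_angled_triangle := by
  intro n _
  unfold Spec_generate_right_angled_triangle generate_right_angled_triangle generate_right_angled_triangle_alt
  rw [pv_foldl_append_map, List.nil_append]
  apply List.map_congr_left
  intro i hi
  rw [PySem.List.mem_pyRange_one] at hi
  exact pv_row_eq n i hi.1 (by omega)
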